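-- pv_equiv track=rewrite | github.com/Pranav1234567/aoc2021 | day4/day4.py | convert_inputs
-- ===== SOURCE A (Python) =====
-- def convert_inputs(lines):
--     count = 0
--     all_grid_locations = []
--     grid_location = dict()
--     row = 0
--     for line in lines:
--         if count == 0:
--             moves = line.split(',')
--         else:
--             if line == '\n':
--                 row = 0
--                 all_grid_locations.append(grid_location)
--                 grid_location = dict()
--             else:
--                 grid_line = line.rstrip().split()
--                 for i in range(len(grid_line)):
--                     grid_location[grid_line[i]] = (row, i)
--                 row += 1
--         count += 1
--
--     all_grid_locations = all_grid_locations[1:]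
--
--     return (moves, all_grid_locations)
-- ===== SOURCE B (Python) =====
-- def convert_inputs(lines):
--     moves = lines[0].split(',')
--     blocks = []
--     current = []
--     for line in lines[1:]:
--         if line == '\n':
--             blocks.append(current)
--             current = []
--         else:
--             current.append(line)
--     grids = [
--         {tok: (r, i)
--          for r, row_line in enumerate(block)
--          for i, tok in enumerate(row_line.rstrip().split())}
--         for block in blocks[1:]
--     ]
--     return (moves, grids)
-- ===== Notes on version B (the rewrite author's own statement) =====
-- stated objective: alternative
-- what changed: Replaces A's single-pass state machine (count flag, running row counter, incrementally mutated dict, drop-first at the end) by a two-phase decomposition: partition lines[1:] into raw blocks at '\n' separators, then build each grid dict from blocks[1:] in one dict comprehension.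
import Mathlib
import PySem

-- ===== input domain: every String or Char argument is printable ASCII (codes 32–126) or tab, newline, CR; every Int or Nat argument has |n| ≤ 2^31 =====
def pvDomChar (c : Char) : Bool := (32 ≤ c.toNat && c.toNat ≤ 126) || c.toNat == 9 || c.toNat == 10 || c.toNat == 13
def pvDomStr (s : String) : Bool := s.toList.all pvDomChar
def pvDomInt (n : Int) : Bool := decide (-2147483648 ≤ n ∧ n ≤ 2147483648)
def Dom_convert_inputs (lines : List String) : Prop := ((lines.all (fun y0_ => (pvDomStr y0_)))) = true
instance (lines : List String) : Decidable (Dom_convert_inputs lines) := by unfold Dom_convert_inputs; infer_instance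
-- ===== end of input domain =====

-- B replaces A's one-pass state machine by: partition lines[1:] into raw blocks at '\n',
-- then build each grid dict from blocks[1:] in one comprehension ("alternative" decomposition).
-- Pre_ excludes only the empty list, on which A raises NameError (moves is unbound).

-- ===== PORT A =====
-- state: (count, moves (none until first line), flushed grids, current dict, row)
def pvStepA (s : Int × Option (List String) × List (List (String × Int × Int)) × PySem.Dict String (Int × Int) × Int)
    (line : String) :
    Int × Option (List String) × List (List (String × Int × Int)) × PySem.Dict String (Int × Int) × Int :=
  let (count, moves, grids, grid, row) := s
  if count == 0 then
    (count + 1, some ((PySem.Str.split? line ",").getD []), grids, grid, row)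
  else if line == "\n" then
    (count + 1, moves, grids ++ [grid.items], PySem.Dict.empty, 0)
  else
    let gridLine := PySem.Str.split₀ (PySem.Str.rstrip line)
    let grid' := (PySem.List.enumerate gridLine).foldl
      (fun d p => d.insert p.2 (row, p.1)) grid
    (count + 1, moves, grids, grid', row + 1)

def convert_inputs (lines : List String) : List String × (List (List (String × Int × Int))) :=
  let st := lines.foldl pvStepA (0, none, [], PySem.Dict.empty, 0)
  (st.2.1.getD [], PySem.List.slice st.2.2.1 (some 1) none)

-- ===== PORT B =====
-- blocks loop: accumulate (flushed blocks, current block)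
def pvStepB (s : List (List String) × List String) (line : String) :
    List (List String) × List String :=
  if line == "\n" then (s.1 ++ [s.2], []) else (s.1, s.2 ++ [line])

-- the dict comprehension for one block
def pvBlockDict (block : List String) : List (String × Int × Int) :=
  ((PySem.List.enumerate block).foldl
    (fun d p =>
      (PySem.List.enumerate (PySem.Str.split₀ (PySem.Str.rstrip p.2))).foldl
        (fun d q => d.insert q.2 (p.1, q.1)) d)
    (PySem.Dict.empty : PySem.Dict String (Int × Int))).items

def convert_inputs_alt (lines : List String) : List String × (List (List (String × Int × Int))) :=
  let moves := (PySem.Str.split? ((PySem.List.pyGet? lines 0).getD "") ",").getD []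
  let st := (PySem.List.slice lines (some 1) none).foldl pvStepB ([], [])
  (moves, (PySem.List.slice st.1 (some 1) none).map pvBlockDict)

-- ===== PRECONDITION & SPEC =====
-- Pre_ excludes exactly the empty list, on which A raises NameError ('moves' never assigned).
def Pre_convert_inputs (lines : List String) : Prop := lines ≠ []
instance (lines : List String) : Decidable (Pre_convert_inputs lines) := by unfold Pre_convert_inputs; infer_instance
def pvWitness_convert_inputs : List String := ["7,4,9\n", "\n", "1 2\n", "3 4\n", "\n", "5 6\n", "7 8\n", "\n"]

def Spec_convert_inputs (lines : List String) (out : List String × (List (List (String × Int × Int)))) : Prop := out = convert_inputs_alt lines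
instance (lines : List String) (out : List String × (List (List (String × Int × Int)))) : Decidable (Spec_convert_inputs lines out) := by unfold Spec_convert_inputs; infer_instance

-- ===== CLAIM (what is proved, stated in full; the proofs are below) =====
def Claim_equal_convert_inputs : Prop := ∀ (lines : List String), Dom_convert_inputs lines → Pre_convert_inputs lines → Spec_convert_inputs lines (convert_inputs lines)

-- ===== LEMMAS AND PROOFS =====

-- the dict built by B for a block, before taking .items
def pvBlockD (block : List String) : PySem.Dict String (Int × Int) :=
  (PySem.List.enumerate block).foldl
    (fun d p =>
      (PySem.List.enumerate (PySem.Str.split₀ (PySem.Str.rstrip p.2))).foldl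
        (fun d q => d.insert q.2 (p.1, q.1)) d)
    PySem.Dict.empty

lemma pvBlockD_snoc (block : List String) (line : String) :
    pvBlockD (block ++ [line]) =
      (PySem.List.enumerate (PySem.Str.split₀ (PySem.Str.rstrip line))).foldl
        (fun d q => d.insert q.2 ((block.length : Int), q.1)) (pvBlockD block) := by
  simp [pvBlockD, PySem.List.enumerate_append, List.foldl_append]

-- A's loop over the tail agrees with B's block loop, given the state relation
lemma pvLoop_eq (rest : List String) :
    ∀ (c : Int) (mv : Option (List String)) (bs : List (List String)) (cur : List String),
    1 ≤ c →
    rest.foldl pvStepA (c, mv, bs.map pvBlockDict, pvBlockD cur, (cur.length : Int)) =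
      (c + rest.length, mv,
        ((rest.foldl pvStepB (bs, cur)).1).map pvBlockDict,
        pvBlockD (rest.foldl pvStepB (bs, cur)).2,
        (((rest.foldl pvStepB (bs, cur)).2).length : Int)) := by
  induction rest with
  | nil => intro c mv bs cur hc; simp
  | cons line rest ih =>
    intro c mv bs cur hc
    have hcz : (c == 0) = false := by simp; omega
    by_cases hnl : line = "\n"
    · have h1 : pvStepA (c, mv, bs.map pvBlockDict, pvBlockD cur, (cur.length : Int)) line =
          (c + 1, mv, (bs ++ [cur]).map pvBlockDict, pvBlockD [], (([] : List String).length : Int)) := by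
        simp [pvStepA, hcz, hnl, pvBlockDict, pvBlockD]
      have h2 : pvStepB (bs, cur) line = (bs ++ [cur], []) := by simp [pvStepB, hnl]
      simp only [List.foldl_cons, h1, h2, ih (c + 1) mv (bs ++ [cur]) [] (by omega)]
      simp [Prod.ext_iff]; omega
    · have h1 : pvStepA (c, mv, bs.map pvBlockDict, pvBlockD cur, (cur.length : Int)) line =
          (c + 1, mv, bs.map pvBlockDict, pvBlockD (cur ++ [line]), ((cur ++ [line]).length : Int)) := by
        simp only [pvStepA, hcz, Bool.false_eq_true, if_false]
        rw [if_neg (by simp [hnl])]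
        rw [pvBlockD_snoc]
        simp
      have h2 : pvStepB (bs, cur) line = (bs, cur ++ [line]) := by simp [pvStepB, hnl]
      simp only [List.foldl_cons, h1, h2, ih (c + 1) mv bs (cur ++ [line]) (by omega)]
      simp [Prod.ext_iff]; omega

-- ===== VERDICT (by name: the statement is the Claim_ definition above) =====
theorem convert_inputs_spec : Claim_equal_convert_inputs := by
  intro lines _ hpre
  unfold Spec_convert_inputs
  match lines with
  | [] => exact absurd rfl hpre
  | l :: rest =>
    unfold convert_inputs convert_inputs_alt
    have hfirst : pvStepA (0, none, [], PySem.Dict.empty, 0) l =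
        (1, some ((PySem.Str.split? l ",").getD []), [], PySem.Dict.empty, 0) := by
      simp [pvStepA]
    have hempty : (PySem.Dict.empty : PySem.Dict String (Int × Int)) = pvBlockD [] := by
      simp [pvBlockD]
    simp only [List.foldl_cons, hfirst]
    rw [hempty]
    have := pvLoop_eq rest 1 (some ((PySem.Str.split? l ",").getD [])) [] [] (by norm_num)
    simp only [List.map_nil, List.length_nil, Int.natCast_zero] at this
    rw [this]
    simp [PySem.List.slice_from_one, PySem.List.pyGet?, PySem.List.pyIdx?,
      List.map_tail]
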